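-- pv_equiv track=rewrite | github.com/polirritmico/codesignal_solutions | Python/The Core/polygonPerimeter.py | solution
-- ===== SOURCE A (Python) =====
-- def solution(matrix: list[list[bool]]) -> int:
--     height = len(matrix)
--     width = len(matrix[0])
--     perimeter = 0
--     for y in range(height):
--         for x in range(width):
--             if not matrix[y][x]:
--                 continue
--             borders = 4
--             if y != 0 and matrix[y - 1][x]:
--                 borders -= 1
--             if y != height - 1 and matrix[y + 1][x]:
--                 borders -= 1
--             if x != 0 and matrix[y][x - 1]:
--                 borders -= 1
--             if x != width - 1 and matrix[y][x + 1]: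
--                 borders -= 1
--             perimeter += borders
--     return perimeter
-- ===== SOURCE B (Python) =====
-- def solution(matrix: list[list[bool]]) -> int:
--     width = len(matrix[0])
--     height = len(matrix)
--     cells = 0
--     edges = 0
--     for y in range(height):
--         row = matrix[y]
--         for x in range(width):
--             if row[x]:
--                 cells += 1
--                 if x + 1 < width and row[x + 1]:
--                     edges += 1
--                 if y + 1 < height and matrix[y + 1][x]:
--                     edges += 1
--     return 4 * cells - 2 * edges
-- ===== Notes on version B (the rewrite author's own statement) =====
-- stated objective: alternative
-- what changed: Instead of decrementing a per-cell border count of 4 by each of the four occupied neighbours, B counts occupied cells and shared edges (checking only the right and down neighbour, so each edge is examined once) and returns 4*cells - 2*edges in closed form.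
import Mathlib
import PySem

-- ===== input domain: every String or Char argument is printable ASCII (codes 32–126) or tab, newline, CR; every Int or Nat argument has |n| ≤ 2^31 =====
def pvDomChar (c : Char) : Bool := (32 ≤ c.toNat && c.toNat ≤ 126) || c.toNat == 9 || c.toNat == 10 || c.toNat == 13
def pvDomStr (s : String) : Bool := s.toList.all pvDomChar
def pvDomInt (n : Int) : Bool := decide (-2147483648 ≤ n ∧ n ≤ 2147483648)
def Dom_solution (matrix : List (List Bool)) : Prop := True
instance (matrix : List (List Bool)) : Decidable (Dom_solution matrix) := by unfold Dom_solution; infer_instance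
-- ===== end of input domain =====

-- B replaces A's per-cell "start at 4, subtract one per occupied neighbour" scan by counting
-- occupied cells and shared edges (right/down neighbour only, once each) and returning
-- 4*cells - 2*edges (an alternative decomposition with the same asymptotic cost).

-- ===== PORT A =====
-- matrix[y][x]; indices produced by the loops are in range under Pre_solution
def pyCell (matrix : List (List Bool)) (y x : Int) : Bool :=
  PySem.List.pyGetD (PySem.List.pyGetD matrix y []) x false

def solution (matrix : List (List Bool)) : Int :=
  let height : Int := matrix.length
  let width : Int := (PySem.List.pyGetD matrix 0 []).length
  (PySem.List.pyRange 0 height 1).foldl (fun perimeter y =>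
    (PySem.List.pyRange 0 width 1).foldl (fun perimeter x =>
      if pyCell matrix y x = false then perimeter
      else
        let borders : Int := 4
        let borders := if y ≠ 0 ∧ pyCell matrix (y - 1) x = true then borders - 1 else borders
        let borders := if y ≠ height - 1 ∧ pyCell matrix (y + 1) x = true then borders - 1 else borders
        let borders := if x ≠ 0 ∧ pyCell matrix y (x - 1) = true then borders - 1 else borders
        let borders := if x ≠ width - 1 ∧ pyCell matrix y (x + 1) = true then borders - 1 else borders
        perimeter + borders) perimeter) 0

-- ===== PORT B =====
def solution_alt (matrix : List (List Bool)) : Int :=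
  let width : Int := (PySem.List.pyGetD matrix 0 []).length
  let height : Int := matrix.length
  let ce : Int × Int := (PySem.List.pyRange 0 height 1).foldl (fun ce y =>
    let row := PySem.List.pyGetD matrix y []
    (PySem.List.pyRange 0 width 1).foldl (fun ce x =>
      if PySem.List.pyGetD row x false = true then
        let cells := ce.1 + 1
        let edges := ce.2
        let edges := if x + 1 < width ∧ PySem.List.pyGetD row (x + 1) false = true then edges + 1 else edges
        let edges := if y + 1 < height ∧ PySem.List.pyGetD (PySem.List.pyGetD matrix (y + 1) []) x false = true then edges + 1 else edges
        (cells, edges)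
      else ce) ce) (0, 0)
  4 * ce.1 - 2 * ce.2

-- ===== PRECONDITION & SPEC =====
-- Pre_ excludes exactly the inputs where the Python A raises IndexError: the empty matrix
-- (matrix[0]) and matrices containing a row shorter than the first row (out-of-range access);
-- the Python B raises there as well.
def Pre_solution (matrix : List (List Bool)) : Prop :=
  match matrix with
  | [] => False
  | r :: _ => ∀ row ∈ matrix, r.length ≤ row.length

instance (matrix : List (List Bool)) : Decidable (Pre_solution matrix) := by
  unfold Pre_solution; cases matrix <;> infer_instance

def pvWitness_solution : List (List Bool) := [[true, false], [true, true]]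

def Spec_solution (matrix : List (List Bool)) (out : Int) : Prop := out = solution_alt matrix
instance (matrix : List (List Bool)) (out : Int) : Decidable (Spec_solution matrix out) := by unfold Spec_solution; infer_instance

-- ===== CLAIM (what is proved, stated in full; the proofs are below) =====
def Claim_equal_solution : Prop := ∀ (matrix : List (List Bool)), Dom_solution matrix → Pre_solution matrix → Spec_solution matrix (solution matrix)

-- ===== LEMMAS AND PROOFS =====

-- the grid as a total Nat-indexed function (default false outside)
def gcell (m : List (List Bool)) (y x : Nat) : Bool := (m.getD y []).getD x false

theorem gcell_eq (m : List (List Bool)) (y x : Nat) :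
    (m.getD y []).getD x false = gcell m y x := rfl

theorem pyCell_natCast (m : List (List Bool)) (y x : Nat) :
    pyCell m (y : Int) (x : Int) = gcell m y x := by
  simp [pyCell, gcell, PySem.List.pyGetD_natCast]

-- per-cell 0/1 indicator terms (cell, up-, down-, left-, right-neighbour edges)
def tC (m : List (List Bool)) (y x : Nat) : Int := if gcell m y x = true then 1 else 0
def tU (m : List (List Bool)) (y x : Nat) : Int :=
  if y ≠ 0 ∧ gcell m (y - 1) x = true ∧ gcell m y x = true then 1 else 0
def tD (m : List (List Bool)) (y x : Nat) : Int :=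
  if y ≠ m.length - 1 ∧ gcell m y x = true ∧ gcell m (y + 1) x = true then 1 else 0
def tL (m : List (List Bool)) (y x : Nat) : Int :=
  if x ≠ 0 ∧ gcell m y (x - 1) = true ∧ gcell m y x = true then 1 else 0
def tR (m : List (List Bool)) (y x : Nat) : Int :=
  if x ≠ (m.getD 0 []).length - 1 ∧ gcell m y x = true ∧ gcell m y (x + 1) = true then 1 else 0

def fRow (m : List (List Bool)) (y : Nat) : Int :=
  ((List.range (m.getD 0 []).length).map
    (fun x => 4 * tC m y x - tU m y x - tD m y x - tL m y x - tR m y x)).sum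
def cRow (m : List (List Bool)) (y : Nat) : Int := ((List.range (m.getD 0 []).length).map (tC m y)).sum
def rU (m : List (List Bool)) (y : Nat) : Int := ((List.range (m.getD 0 []).length).map (tU m y)).sum
def rD (m : List (List Bool)) (y : Nat) : Int := ((List.range (m.getD 0 []).length).map (tD m y)).sum
def rL (m : List (List Bool)) (y : Nat) : Int := ((List.range (m.getD 0 []).length).map (tL m y)).sum
def rR (m : List (List Bool)) (y : Nat) : Int := ((List.range (m.getD 0 []).length).map (tR m y)).sum
def eRow (m : List (List Bool)) (y : Nat) : Int :=
  ((List.range (m.getD 0 []).length).map (fun x => tR m y x + tD m y x)).sum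

-- horizontal edge between rows y and y+1
def eH (m : List (List Bool)) (y : Nat) : Int :=
  ((List.range (m.getD 0 []).length).map
    (fun x => if gcell m y x = true ∧ gcell m (y + 1) x = true then 1 else 0)).sum
-- vertical edge between columns x and x+1 in row y
def eV (m : List (List Bool)) (y x : Nat) : Int :=
  if gcell m y x = true ∧ gcell m y (x + 1) = true then 1 else 0

-- generic loop shapes
theorem foldl_add_congr {α : Type} (l : List α) (F : Int → α → Int) (f : α → Int) (i : Int)
    (h : ∀ acc : Int, ∀ a ∈ l, F acc a = acc + f a) :
    l.foldl F i = i + (l.map f).sum := by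
  induction l generalizing i with
  | nil => simp
  | cons a t ih =>
    rw [List.foldl_cons, h i a (by simp),
      ih _ (fun acc b hb => h acc b (by simp [hb]))]
    simp [List.map_cons, List.sum_cons]; ring

theorem foldl_pair_congr {α : Type} (l : List α) (F : Int × Int → α → Int × Int)
    (f g : α → Int) (p : Int × Int)
    (h : ∀ q : Int × Int, ∀ a ∈ l, F q a = (q.1 + f a, q.2 + g a)) :
    l.foldl F p = (p.1 + (l.map f).sum, p.2 + (l.map g).sum) := by
  induction l generalizing p with
  | nil => simp
  | cons a t ih =>
    rw [List.foldl_cons, h p a (by simp),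
      ih _ (fun q b hb => h q b (by simp [hb]))]
    simp [List.map_cons, List.sum_cons]
    constructor <;> ring

theorem pair_goal {α : Type} (l : List α) (F : Int × Int → α → Int × Int)
    (f g : α → Int) (S : Int)
    (h : ∀ q : Int × Int, ∀ a ∈ l, F q a = (q.1 + f a, q.2 + g a))
    (hS : S = 4 * (l.map f).sum - 2 * (l.map g).sum) :
    S = 4 * (l.foldl F (0, 0)).1 - 2 * (l.foldl F (0, 0)).2 := by
  rw [foldl_pair_congr l F f g _ h]; simpa using hS

theorem sum_map5 {α : Type} (l : List α) (f u d lf rt : α → Int) :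
    (l.map (fun a => 4 * f a - u a - d a - lf a - rt a)).sum
      = 4 * (l.map f).sum - (l.map u).sum - (l.map d).sum - (l.map lf).sum - (l.map rt).sum := by
  induction l with
  | nil => simp
  | cons a t ih => simp [ih]; ring

theorem sum_shift (N : Nat) (E : Nat → Int) :
    ((List.range N).map (fun y => if y ≠ 0 then E (y - 1) else 0)).sum
      = ((List.range N).map (fun y => if y ≠ N - 1 then E y else 0)).sum := by
  cases N with
  | zero => simp
  | succ n =>
    have hL : ((List.range (n + 1)).map (fun y => if y ≠ 0 then E (y - 1) else 0)).sum
        = ((List.range n).map E).sum := by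
      rw [List.range_succ_eq_map, List.map_cons, List.map_map, List.sum_cons]
      have hcomp : ((fun y => if y ≠ 0 then E (y - 1) else 0) ∘ Nat.succ) = E := by
        funext y; simp
      rw [hcomp]; simp
    have hmap : (List.range n).map (fun y => if y ≠ (n + 1) - 1 then E y else 0)
        = (List.range n).map E :=
      List.map_congr_left (fun y hy => by
        rw [List.mem_range] at hy; simp [Nat.ne_of_lt hy])
    have hR : ((List.range (n + 1)).map (fun y => if y ≠ (n + 1) - 1 then E y else 0)).sum
        = ((List.range n).map E).sum := by
      rw [List.range_succ, List.map_append, List.sum_append, hmap]; simp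
    rw [hL, hR]

-- pulling the boundary guard out of a row sum
theorem rU_pull (m : List (List Bool)) (y : Nat) :
    rU m y = if y ≠ 0 then eH m (y - 1) else 0 := by
  by_cases h : y = 0
  · subst h
    have hz : ∀ x ∈ List.range (m.getD 0 []).length, tU m 0 x = 0 := fun x _ => by simp [tU]
    unfold rU; rw [List.map_congr_left hz]; simp
  · rw [if_pos h]; unfold rU eH; congr 1
    refine List.map_congr_left (fun x _ => ?_)
    simp [tU, h, Nat.sub_add_cancel (Nat.one_le_iff_ne_zero.mpr h)]

theorem rD_pull (m : List (List Bool)) (y : Nat) :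
    rD m y = if y ≠ m.length - 1 then eH m y else 0 := by
  by_cases h : y = m.length - 1
  · have hz : ∀ x ∈ List.range (m.getD 0 []).length, tD m y x = 0 := fun x _ => by simp [tD, h]
    unfold rD; rw [List.map_congr_left hz]; simp [h]
  · rw [if_pos h]; unfold rD eH; congr 1
    exact List.map_congr_left (fun x _ => by simp [tD, h])

theorem tL_pull (m : List (List Bool)) (y x : Nat) :
    tL m y x = if x ≠ 0 then eV m y (x - 1) else 0 := by
  by_cases h : x = 0
  · simp [tL, h]
  · simp [tL, eV, h, Nat.sub_add_cancel (Nat.one_le_iff_ne_zero.mpr h)]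

theorem tR_pull (m : List (List Bool)) (y x : Nat) :
    tR m y x = if x ≠ (m.getD 0 []).length - 1 then eV m y x else 0 := by
  unfold tR eV; split_ifs <;> tauto

theorem U_eq_D (m : List (List Bool)) :
    ((List.range m.length).map (rU m)).sum = ((List.range m.length).map (rD m)).sum := by
  have h1 : (List.range m.length).map (rU m)
      = (List.range m.length).map (fun y => if y ≠ 0 then eH m (y - 1) else 0) :=
    List.map_congr_left (fun y _ => rU_pull m y)
  have h2 : (List.range m.length).map (rD m)
      = (List.range m.length).map (fun y => if y ≠ m.length - 1 then eH m y else 0) :=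
    List.map_congr_left (fun y _ => rD_pull m y)
  rw [h1, h2]; exact sum_shift m.length (eH m)

theorem L_eq_R (m : List (List Bool)) (y : Nat) : rL m y = rR m y := by
  have h1 : (List.range (m.getD 0 []).length).map (tL m y)
      = (List.range (m.getD 0 []).length).map (fun x => if x ≠ 0 then eV m y (x - 1) else 0) :=
    List.map_congr_left (fun x _ => tL_pull m y x)
  have h2 : (List.range (m.getD 0 []).length).map (tR m y)
      = (List.range (m.getD 0 []).length).map
          (fun x => if x ≠ (m.getD 0 []).length - 1 then eV m y x else 0) :=
    List.map_congr_left (fun x _ => tR_pull m y x)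
  unfold rL rR
  rw [h1, h2]; exact sum_shift (m.getD 0 []).length (eV m y)

theorem fRow_split (m : List (List Bool)) (y : Nat) :
    fRow m y = 4 * cRow m y - rU m y - rD m y - rL m y - rR m y := by
  unfold fRow cRow rU rD rL rR
  exact sum_map5 _ (tC m y) (tU m y) (tD m y) (tL m y) (tR m y)

theorem eRow_split (m : List (List Bool)) (y : Nat) :
    eRow m y = rR m y + rD m y := by
  unfold eRow rR rD
  exact PySem.List.sum_map_add_int _ (tR m y) (tD m y)

theorem assemble {α : Type} (l : List α) (c u d lf rt : α → Int)
    (hUD : (l.map u).sum = (l.map d).sum) (hLR : (l.map lf).sum = (l.map rt).sum) :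
    0 + (l.map (fun a => 4 * c a - u a - d a - lf a - rt a)).sum
      = 4 * (l.map c).sum - 2 * (l.map (fun a => rt a + d a)).sum := by
  have h5 := sum_map5 l c u d lf rt
  have h2 := PySem.List.sum_map_add_int l rt d
  omega

theorem hS_lemma (m : List (List Bool)) :
    0 + ((List.range m.length).map (fRow m)).sum
      = 4 * ((List.range m.length).map (cRow m)).sum
        - 2 * ((List.range m.length).map (eRow m)).sum := by
  have hf : (List.range m.length).map (fRow m)
      = (List.range m.length).map (fun y => 4 * cRow m y - rU m y - rD m y - rL m y - rR m y) :=
    List.map_congr_left (fun y _ => fRow_split m y)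
  have he : (List.range m.length).map (eRow m)
      = (List.range m.length).map (fun y => rR m y + rD m y) :=
    List.map_congr_left (fun y _ => eRow_split m y)
  rw [hf, he]
  exact assemble (List.range m.length) (cRow m) (rU m) (rD m) (rL m) (rR m)
    (U_eq_D m) (List.map_congr_left (fun y _ => L_eq_R m y) ▸ rfl)

theorem A_eq (m : List (List Bool)) :
    solution m = 0 + ((List.range m.length).map (fRow m)).sum := by
  unfold solution
  simp only [PySem.List.pyGetD_zero, PySem.List.pyRange_zero_natCast, List.foldl_map]
  apply foldl_add_congr
  intro acc y hy
  rw [List.mem_range] at hy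
  simp only [fRow]
  apply foldl_add_congr
  intro acc2 x hx
  rw [List.mem_range] at hx
  simp only [pyCell_natCast]
  have e1 : ((y : Int) ≠ 0 ∧ pyCell m ((y : Int) - 1) (x : Int) = true)
      ↔ (y ≠ 0 ∧ gcell m (y - 1) x = true) := by
    by_cases h0 : y = 0
    · subst h0; simp
    · have hc1 : ((y : Int) - 1) = (((y - 1 : Nat)) : Int) := by omega
      rw [hc1, pyCell_natCast]
      constructor <;> rintro ⟨h1, h2⟩ <;> exact ⟨by omega, h2⟩
  have e2 : ((y : Int) ≠ (m.length : Int) - 1 ∧ pyCell m ((y : Int) + 1) (x : Int) = true)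
      ↔ (y ≠ m.length - 1 ∧ gcell m (y + 1) x = true) := by
    have hc1 : ((y : Int) + 1) = (((y + 1 : Nat)) : Int) := by push_cast; ring
    rw [hc1, pyCell_natCast]
    constructor <;> rintro ⟨h1, h2⟩ <;> exact ⟨by omega, h2⟩
  have e3 : ((x : Int) ≠ 0 ∧ pyCell m (y : Int) ((x : Int) - 1) = true)
      ↔ (x ≠ 0 ∧ gcell m y (x - 1) = true) := by
    by_cases h0 : x = 0
    · subst h0; simp
    · have hc1 : ((x : Int) - 1) = (((x - 1 : Nat)) : Int) := by omega
      rw [hc1, pyCell_natCast]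
      constructor <;> rintro ⟨h1, h2⟩ <;> exact ⟨by omega, h2⟩
  have e4 : ((x : Int) ≠ ((m.getD 0 []).length : Int) - 1 ∧ pyCell m (y : Int) ((x : Int) + 1) = true)
      ↔ (x ≠ (m.getD 0 []).length - 1 ∧ gcell m y (x + 1) = true) := by
    have hc1 : ((x : Int) + 1) = (((x + 1 : Nat)) : Int) := by push_cast; ring
    rw [hc1, pyCell_natCast]
    constructor <;> rintro ⟨h1, h2⟩ <;> exact ⟨by omega, h2⟩
  by_cases hc : gcell m y x = true
  · simp only [e1, e2, e3, e4]
    simp [hc, tC, tU, tD, tL, tR]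
    split_ifs <;> ring
  · rw [Bool.not_eq_true] at hc
    simp [hc, tC, tU, tD, tL, tR]

theorem main_eq (m : List (List Bool)) : solution m = solution_alt m := by
  rw [A_eq]
  unfold solution_alt
  simp only [PySem.List.pyGetD_zero, PySem.List.pyRange_zero_natCast, List.foldl_map]
  refine pair_goal _ _ (cRow m) (eRow m) _ ?_ (hS_lemma m)
  intro q y hy
  rw [List.mem_range] at hy
  simp only [cRow, eRow]
  apply foldl_pair_congr
  intro q2 x hx
  rw [List.mem_range] at hx
  simp only [PySem.List.pyGetD_natCast, gcell_eq]
  have f1 : ((x : Int) + 1 < ((m.getD 0 []).length : Int)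
        ∧ PySem.List.pyGetD (m.getD y []) ((x : Int) + 1) false = true)
      ↔ (x ≠ (m.getD 0 []).length - 1 ∧ gcell m y (x + 1) = true) := by
    have hc1 : ((x : Int) + 1) = (((x + 1 : Nat)) : Int) := by push_cast; ring
    rw [hc1, PySem.List.pyGetD_natCast, gcell_eq]
    constructor <;> rintro ⟨h1, h2⟩ <;> exact ⟨by omega, h2⟩
  have f2 : ((y : Int) + 1 < (m.length : Int)
        ∧ (PySem.List.pyGetD m ((y : Int) + 1) []).getD x false = true)
      ↔ (y ≠ m.length - 1 ∧ gcell m (y + 1) x = true) := by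
    have hc1 : ((y : Int) + 1) = (((y + 1 : Nat)) : Int) := by push_cast; ring
    rw [hc1, PySem.List.pyGetD_natCast, gcell_eq]
    constructor <;> rintro ⟨h1, h2⟩ <;> exact ⟨by omega, h2⟩
  by_cases hc : gcell m y x = true
  · simp only [f1, f2]
    simp [hc, tC, tR, tD]
    split_ifs <;> simp <;> omega
  · rw [Bool.not_eq_true] at hc
    simp [hc, tC, tR, tD]

-- ===== VERDICT (by name: the statement is the Claim_ definition above) =====
theorem solution_spec : Claim_equal_solution := by
  intro m _ _
  exact main_eq m
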